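-- pv_equiv track=rewrite | github.com/tanhm12/Code-Workout | Leetcode/1717.py | count
-- ===== SOURCE A (Python) =====
-- def count(s: str, first: str, second: str, point: int) -> (int, str):
--     if len(s) == 0:
--         return 0, ""
--     stack = []
--     res = 0
--     for c in s:
--         if len(stack) > 0 and c == second and stack[-1] == first:
--             res += point
--             stack.pop()
--         else:
--             stack.append(c)
--     return res, "".join(stack)
-- ===== SOURCE B (Python) =====
-- def count(s: str, first: str, second: str, point: int) -> (int, str):
--     t = list(s)
--     score = 0
--     while True:
--         found = False
--         for i in range(len(t) - 1):
--             if t[i] == first and t[i + 1] == second: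
--                 del t[i:i + 2]
--                 score += point
--                 found = True
--                 break
--         if not found:
--             return score, "".join(t)
-- ===== Notes on version B (the rewrite author's own statement) =====
-- stated objective: alternative
-- what changed: Replaces A's single left-to-right pass with an explicit stack by repeated scans that delete the leftmost adjacent (first,second) character pair and restart until none remains; confluence of the pair-deletion rewriting gives the same score and leftover.
import Mathlib
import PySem

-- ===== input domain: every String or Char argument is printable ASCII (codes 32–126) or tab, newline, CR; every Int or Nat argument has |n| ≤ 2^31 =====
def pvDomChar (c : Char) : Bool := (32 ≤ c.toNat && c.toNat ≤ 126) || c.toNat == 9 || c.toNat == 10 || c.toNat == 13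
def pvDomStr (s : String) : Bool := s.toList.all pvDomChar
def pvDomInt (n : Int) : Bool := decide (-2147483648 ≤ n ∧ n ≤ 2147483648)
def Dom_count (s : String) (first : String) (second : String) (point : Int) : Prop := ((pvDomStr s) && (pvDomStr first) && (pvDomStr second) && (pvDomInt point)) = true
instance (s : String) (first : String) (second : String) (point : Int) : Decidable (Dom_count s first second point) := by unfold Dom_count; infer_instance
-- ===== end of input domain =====

-- B is an alternative (not faster) implementation: repeated leftmost-pair deletion instead of A's one-pass stack.

-- ===== PORT A =====
-- the loop body: a 1-char string `c` is compared to `second`, the stack top to `first`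
-- (the stack is kept reversed, head = top; "".join(stack) = String.ofList stack.reverse)
def stepA (first second : String) (point : Int) (acc : Int × List Char) (c : Char) : Int × List Char :=
  match acc with
  | (r, []) => (r, [c])
  | (r, t :: st) =>
      if String.ofList [c] = second ∧ String.ofList [t] = first then (r + point, st)
      else (r, c :: t :: st)

def count (s : String) (first : String) (second : String) (point : Int) : Int × String :=
  if s.length = 0 then (0, "")
  else
    let res := s.toList.foldl (stepA first second point) (0, [])
    (res.1, String.ofList res.2.reverse)

-- ===== PORT B =====
-- inner scan of B: first position with t[i] == first and t[i+1] == second; returns the list with that pair deleted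
def findPair (first second : String) : List Char → Option (List Char)
  | a :: b :: t =>
      if String.ofList [a] = first ∧ String.ofList [b] = second then some t
      else (findPair first second (b :: t)).map (a :: ·)
  | _ => none

theorem findPair_length {first second : String} :
    ∀ {l t : List Char}, findPair first second l = some t → t.length + 2 = l.length := by
  intro l
  induction l with
  | nil => intro t h; simp [findPair] at h
  | cons a l ih =>
    intro t h
    match l with
    | [] => simp [findPair] at h
    | b :: l' =>
      simp only [findPair] at h
      split at h
      · cases h; simp
      · simp only [Option.map_eq_some_iff] at h
        obtain ⟨t', ht', rfl⟩ := h
        have := ih ht'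
        simpa using this

-- outer loop of B: delete the leftmost pair and restart until no pair remains
def loopB (first second : String) (point : Int) (l : List Char) (score : Int) : Int × String :=
  match h : findPair first second l with
  | some t => loopB first second point t (score + point)
  | none => (score, String.ofList l)
termination_by l.length
decreasing_by have := findPair_length h; omega

def count_alt (s : String) (first : String) (second : String) (point : Int) : Int × String :=
  loopB first second point s.toList 0

-- ===== PRECONDITION & SPEC =====
def Spec_count (s : String) (first : String) (second : String) (point : Int) (out : Int × String) : Prop := out = count_alt s first second point
instance (s : String) (first : String) (second : String) (point : Int) (out : Int × String) : Decidable (Spec_count s first second point out) := by unfold Spec_count; infer_instance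

-- ===== CLAIM (what is proved, stated in full; the proofs are below) =====
def Claim_equal_count : Prop := ∀ (s : String) (first : String) (second : String) (point : Int), Dom_count s first second point → Spec_count s first second point (count s first second point)

-- ===== LEMMAS AND PROOFS =====

-- forbidden adjacent pattern in the input string: (first, second)
def pfS (first second : String) (x y : Char) : Prop := ¬(String.ofList [x] = first ∧ String.ofList [y] = second)
-- forbidden adjacent pattern in the reversed stack (head = top): (second above first)
def pfR (first second : String) (x y : Char) : Prop := ¬(String.ofList [x] = second ∧ String.ofList [y] = first)

theorem mk_single_inj {x y : Char} {w : String} (hx : String.ofList [x] = w) (hy : String.ofList [y] = w) : x = y := by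
  have h := String.ofList_inj.mp (hx.trans hy.symm)
  injection h

-- a pair-free suffix is just pushed onto the stack
theorem foldl_nopair (first second : String) (point : Int) :
    ∀ (l : List Char) (r : Int) (st : List Char),
      List.IsChain (pfR first second) (l.reverse ++ st) →
      l.foldl (stepA first second point) (r, st) = (r, l.reverse ++ st) := by
  intro l
  induction l with
  | nil => intro r st h; simp
  | cons c t ih =>
    intro r st h
    have hre : (c :: t).reverse ++ st = t.reverse ++ (c :: st) := by simp
    rw [hre] at h
    have hstep : stepA first second point (r, st) c = (r, c :: st) := by
      match st with
      | [] => rfl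
      | h0 :: st' =>
        have hchain : List.IsChain (pfR first second) (c :: h0 :: st') :=
          (List.isChain_append.mp h).2.1
        have hR : pfR first second c h0 := (List.isChain_cons_cons.mp hchain).1
        simp only [pfR] at hR
        simp only [stepA, if_neg hR]
    rw [List.foldl_cons, hstep, ih r (c :: st) h, hre]

-- deleting one (first,second) pair: two steps from a reduced stack return to the same stack, score + point
theorem foldl_delete (first second : String) (point : Int) {a b : Char}
    (ha : String.ofList [a] = first) (hb : String.ofList [b] = second) :
    ∀ (v : List Char) (r : Int) (st : List Char), List.IsChain (pfR first second) st →
      (a :: b :: v).foldl (stepA first second point) (r, st) =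
      v.foldl (stepA first second point) (r + point, st) := by
  intro v r st hst
  match st with
  | [] =>
    simp only [List.foldl_cons]
    have h1 : stepA first second point (r, []) a = (r, [a]) := rfl
    have h2 : stepA first second point (r, [a]) b = (r + point, []) := by
      simp [stepA, ha, hb]
    rw [h1, h2]
  | h0 :: st' =>
    by_cases hpop : String.ofList [a] = second ∧ String.ofList [h0] = first
    · -- `a` itself pops the top; then `b` is pushed back, restoring the same stack
      have hah : h0 = a := mk_single_inj hpop.2 ha
      have hba : b = a := mk_single_inj hb (hah ▸ hpop.1)
      simp only [List.foldl_cons]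
      have h1 : stepA first second point (r, h0 :: st') a = (r + point, st') := by
        simp only [stepA, if_pos hpop]
      rw [h1]
      have h2 : stepA first second point (r + point, st') b = (r + point, h0 :: st') := by
        match st' with
        | [] => simp [stepA, hba, hah]
        | h1c :: st'' =>
          have hR : pfR first second h0 h1c := (List.isChain_cons_cons.mp hst).1
          have hnot : ¬ String.ofList [h1c] = first := by
            intro hc
            exact hR ⟨hah ▸ hpop.1, hc⟩
          have hcond : ¬ (String.ofList [b] = second ∧ String.ofList [h1c] = first) := by
            intro hx; exact hnot hx.2
          simp only [stepA]
          rw [if_neg hcond, hba, hah]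
      rw [h2]
    · simp only [List.foldl_cons]
      have h1 : stepA first second point (r, h0 :: st') a = (r, a :: h0 :: st') := by
        simp only [stepA, if_neg hpop]
      have h2 : stepA first second point (r, a :: h0 :: st') b = (r + point, h0 :: st') := by
        simp [stepA, ha, hb]
      rw [h1, h2]

-- the score threads through the fold additively
theorem foldl_score_shift (first second : String) (point : Int) :
    ∀ (v : List Char) (r q : Int) (st : List Char),
      v.foldl (stepA first second point) (r + q, st) =
      ((v.foldl (stepA first second point) (r, st)).1 + q,
       (v.foldl (stepA first second point) (r, st)).2) := by
  intro v
  induction v with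
  | nil => intro r q st; simp
  | cons c t ih =>
    intro r q st
    simp only [List.foldl_cons]
    match st with
    | [] => exact ih r q [c]
    | h0 :: st' =>
      by_cases hp : String.ofList [c] = second ∧ String.ofList [h0] = first
      · simp only [stepA, if_pos hp]
        have he : r + q + point = r + point + q := by ring
        rw [he]; exact ih (r + point) q st'
      · simp only [stepA, if_neg hp]
        exact ih r q (c :: h0 :: st')

theorem findPair_none {first second : String} :
    ∀ {l : List Char}, findPair first second l = none → List.IsChain (pfS first second) l := by
  intro l
  induction l with
  | nil => intro _; simp
  | cons a l ih =>
    intro h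
    match l with
    | [] => simp
    | b :: l' =>
      simp only [findPair] at h
      split at h
      · exact absurd h (by simp)
      · rename_i hcond
        simp only [Option.map_eq_none_iff] at h
        exact List.isChain_cons_cons.mpr ⟨hcond, ih h⟩

theorem findPair_some {first second : String} :
    ∀ {l t : List Char}, findPair first second l = some t →
      ∃ u a b v, l = u ++ a :: b :: v ∧ t = u ++ v ∧
        String.ofList [a] = first ∧ String.ofList [b] = second ∧
        List.IsChain (pfS first second) (u ++ [a]) := by
  intro l
  induction l with
  | nil => intro t h; simp [findPair] at h
  | cons a l ih =>
    intro t h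
    match l with
    | [] => simp [findPair] at h
    | b :: l' =>
      simp only [findPair] at h
      split at h
      · rename_i hcond
        injection h with h'
        subst h'
        exact ⟨[], a, b, l', by simp, by simp, hcond.1, hcond.2, by simp⟩
      · rename_i hcond
        simp only [Option.map_eq_some_iff] at h
        obtain ⟨t', ht', rfl⟩ := h
        obtain ⟨u, x, y, v, hl, ht, hx, hy, hch⟩ := ih ht'
        refine ⟨a :: u, x, y, v, by simp [hl], by simp [ht], hx, hy, ?_⟩
        cases u with
        | nil =>
          have hbx : b = x := by
            simpa using congrArg (·.head?) hl
          refine List.isChain_cons_cons.mpr ⟨?_, by simp⟩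
          intro hp
          exact hcond ⟨hp.1, hbx ▸ hp.2⟩
        | cons c u' =>
          have hbc : b = c := by
            simpa using congrArg (·.head?) hl
          refine List.isChain_cons_cons.mpr ⟨?_, by simpa using hch⟩
          intro hp
          exact hcond ⟨hp.1, hbc ▸ hp.2⟩

-- pair-freeness of the input transfers to the reversed stack
theorem chainS_reverse {first second : String} {u : List Char}
    (h : List.IsChain (pfS first second) u) : List.IsChain (pfR first second) u.reverse := by
  rw [List.isChain_reverse]
  exact h.imp (fun a b hxy => by
    intro hp
    exact hxy ⟨hp.2, hp.1⟩)

-- main induction: the stack pass computes what the repeated-deletion loop computes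
theorem main_lemma (first second : String) (point : Int) :
    ∀ (n : Nat) (l : List Char), l.length ≤ n → ∀ (score : Int),
      loopB first second point l score =
        ((l.foldl (stepA first second point) (0, [])).1 + score,
         String.ofList (l.foldl (stepA first second point) (0, [])).2.reverse) := by
  intro n
  induction n with
  | zero =>
    intro l hl score
    have hnil : l = [] := List.length_eq_zero_iff.mp (Nat.le_zero.mp hl)
    subst hnil
    rw [loopB]
    simp [findPair]
  | succ n ih =>
    intro l hl score
    rw [loopB]
    split
    · rename_i t h
      obtain ⟨u, a, b, v, hlu, htu, ha, hb, hch⟩ := findPair_some h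
      have hlen : t.length + 2 = l.length := findPair_length h
      have hRu : List.IsChain (pfR first second) u.reverse :=
        chainS_reverse ((List.isChain_append.mp hch).1)
      have hfold_u : u.foldl (stepA first second point) (0, []) = ((0 : Int), u.reverse) := by
        have := foldl_nopair first second point u 0 [] (by simpa using hRu)
        simpa using this
      have hfold_l : l.foldl (stepA first second point) (0, []) =
          ((v.foldl (stepA first second point) (0, u.reverse)).1 + point,
           (v.foldl (stepA first second point) (0, u.reverse)).2) := by
        rw [hlu, List.foldl_append, hfold_u,
            foldl_delete first second point ha hb v 0 u.reverse hRu]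
        have := foldl_score_shift first second point v 0 point u.reverse
        simpa using this
      have hfold_t : t.foldl (stepA first second point) (0, []) =
          v.foldl (stepA first second point) (0, u.reverse) := by
        rw [htu, List.foldl_append, hfold_u]
      rw [ih t (by omega) (score + point), hfold_t, hfold_l]
      refine Prod.ext ?_ rfl
      simp only
      ring
    · rename_i h
      have hch := findPair_none h
      have hR : List.IsChain (pfR first second) (l.reverse ++ ([] : List Char)) := by
        simpa using chainS_reverse hch
      rw [foldl_nopair first second point l 0 [] hR]
      simp

-- ===== VERDICT (by name: the statement is the Claim_ definition above) =====
theorem count_spec : Claim_equal_count := by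
  intro s first second point _
  unfold Spec_count count count_alt
  rw [main_lemma first second point s.toList.length s.toList le_rfl 0]
  split
  · rename_i hlen
    have hnil : s.toList = [] :=
      String.toList_eq_nil_iff.mpr (String.length_eq_zero_iff.mp hlen)
    simp [hnil]
  · simp
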